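-- pv_equiv track=rewrite | github.com/JiinJie/Python_algorithm_exercise | 算法汇总/CSDN_od/py_version/008_单词接龙_100.py | solve
-- ===== SOURCE A (Python) =====
-- def solve(k, words):
--     builder = words[k]
--     del words[k]
--
--     words = sorted(words, key=lambda x: (-len(x), x))
--
--     while True:
--         len_ = len(builder)
--         last = builder[-1]
--         for i in range(len(words)):
--             cur = words[i]
--             if cur.startswith(last):
--                 builder += cur
--                 del words[i]
--                 break
--         if len(builder) == len_:
--             break
--
--     return builder
-- ===== SOURCE B (Python) =====
-- def solve(k, words):
--     builder = words[k]
--     del words[k]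
--
--     buckets = {}
--     for w in sorted(words, key=lambda x: (-len(x), x)):
--         if w:
--             buckets.setdefault(w[0], []).append(w)
--     for b in buckets.values():
--         b.reverse()
--
--     last = builder[-1]
--     while True:
--         b = buckets.get(last)
--         if not b:
--             break
--         w = b.pop()
--         builder += w
--         last = w[-1]
--     return builder
-- ===== Notes on version B (the rewrite author's own statement) =====
-- stated objective: faster
-- what changed: B groups the sorted words into first-character buckets once and pops the next chain word from its bucket in O(1) per step, instead of A's per-step linear rescan of the word list with in-list deletion.
import Mathlib
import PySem

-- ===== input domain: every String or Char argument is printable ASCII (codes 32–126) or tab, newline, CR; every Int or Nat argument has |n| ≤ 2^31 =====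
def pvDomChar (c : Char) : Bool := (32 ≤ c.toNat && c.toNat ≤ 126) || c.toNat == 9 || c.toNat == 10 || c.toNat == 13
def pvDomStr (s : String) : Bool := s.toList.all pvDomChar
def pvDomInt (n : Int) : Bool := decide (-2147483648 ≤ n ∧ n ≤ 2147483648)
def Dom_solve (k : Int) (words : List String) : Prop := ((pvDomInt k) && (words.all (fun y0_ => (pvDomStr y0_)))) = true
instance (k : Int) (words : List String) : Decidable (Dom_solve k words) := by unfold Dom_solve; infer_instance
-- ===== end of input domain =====

-- B replaces A's repeated linear scan of the sorted word list (with list deletion) by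
-- first-character buckets popped from the end; equivalence is about the RETURN value
-- (both A and B perform the same 'del words[k]' on the caller's list).

-- ===== PORT A =====
-- the inner 'for i in range(len(words)): cur = words[i]; if cur.startswith(last): … del words[i]; break'
-- (last is the one-char string builder[-1]): first match and the list with it removed
def solveFind (last : Char) : List String → Option (String × List String)
  | [] => none
  | w :: ws =>
    if PySem.Str.startswith w (String.ofList [last]) then some (w, ws)
    else
      match solveFind last ws with
      | none => none
      | some (cur, rest) => some (cur, w :: rest)

-- termination helper for solveLoop (cited in decreasing_by)
theorem solveFind_length (last : Char) : ∀ (ws rest : List String) (w : String),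
    solveFind last ws = some (w, rest) → rest.length + 1 = ws.length := by
  intro ws
  induction ws with
  | nil => intro rest w h; simp [solveFind] at h
  | cons x xs ih =>
    intro rest w h
    simp only [solveFind] at h
    split at h
    · cases h; rfl
    · cases hf : solveFind last xs with
      | none => rw [hf] at h; cases h
      | some p =>
        rw [hf] at h
        cases h
        have := ih _ _ hf
        simp [List.length]
        omega

-- the 'while True:' loop of A
def solveLoop (words : List String) (builder : String) : String :=
  match PySem.Str.pyGet? builder (-1) with
  | none => builder        -- builder[-1] raises IndexError (builder = ""); excluded by Pre_solve
  | some last =>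
    match h : solveFind last words with
    | none => builder      -- no word consumed: len(builder) == len_, break
    | some (cur, rest) => solveLoop rest (builder ++ cur)
termination_by words.length
decreasing_by have := solveFind_length last words rest cur h; omega

def solve (k : Int) (words : List String) : String :=
  match PySem.List.pop? words k with   -- builder = words[k]; del words[k]
  | none => ""                         -- IndexError; excluded by Pre_solve
  | some (builder, rest) =>
    solveLoop (PySem.List.sorted2 rest (fun x => -(PySem.Str.len x)) (fun x => x)) builder

-- ===== PORT B =====
-- 'for w in sorted(…): if w: buckets.setdefault(w[0], []).append(w)'
def solveBuild (ws : List String) : PySem.Dict Char (List String) :=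
  ws.foldl (fun d w =>
    match PySem.Str.pyGet? w 0 with
    | none => d                            -- 'if w:' — empty word skipped
    | some c => d.insert c (d.getD c [] ++ [w])) PySem.Dict.empty

-- 'for b in buckets.values(): b.reverse()'  (in-place reversal of every value)
def solveRevVals (d : PySem.Dict Char (List String)) : PySem.Dict Char (List String) :=
  PySem.Dict.mk (d.items.map (fun kv => (kv.1, kv.2.reverse)))

-- B's 'while True:' loop; fuel (the initial number of words, ≥ the number of pops) only
-- makes the recursion total, the 0 case is never reached
def solveChain (fuel : Nat) (buckets : PySem.Dict Char (List String)) (last : Char)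
    (builder : String) : String :=
  match fuel with
  | 0 => builder
  | fuel + 1 =>
    match (buckets.getD last []).getLast? with
    | none => builder                      -- 'if not b: break'
    | some w =>
      match PySem.Str.pyGet? w (-1) with
      | none => builder                    -- w[-1] IndexError; unreachable: buckets hold no ""
      | some c =>
        solveChain fuel (buckets.insert last (buckets.getD last []).dropLast) c (builder ++ w)

def solve_alt (k : Int) (words : List String) : String :=
  match PySem.List.pop? words k with   -- builder = words[k]; del words[k]
  | none => ""                         -- IndexError; excluded by Pre_solve
  | some (builder, rest) =>
    match PySem.Str.pyGet? builder (-1) with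
    | none => builder                  -- builder[-1] IndexError; excluded by Pre_solve
    | some last =>
      solveChain rest.length
        (solveRevVals (solveBuild (PySem.List.sorted2 rest (fun x => -(PySem.Str.len x)) (fun x => x))))
        last builder

-- ===== PRECONDITION & SPEC =====
-- Pre_ excludes exactly the inputs where A raises IndexError: k out of range, or
-- words[k] = "" (then builder[-1] raises on the first loop iteration).
def Pre_solve (k : Int) (words : List String) : Prop :=
  (PySem.List.pop? words k).map Prod.fst ≠ none ∧
  (PySem.List.pop? words k).map Prod.fst ≠ some ""
instance (k : Int) (words : List String) : Decidable (Pre_solve k words) := by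
  unfold Pre_solve; infer_instance
def pvWitness_solve : Int × List String := (0, ["ab", "bc"])
def Spec_solve (k : Int) (words : List String) (out : String) : Prop := out = solve_alt k words
instance (k : Int) (words : List String) (out : String) : Decidable (Spec_solve k words out) := by unfold Spec_solve; infer_instance

-- ===== CLAIM (what is proved, stated in full; the proofs are below) =====
def Claim_equal_solve : Prop := ∀ (k : Int) (words : List String), Dom_solve k words → Pre_solve k words → Spec_solve k words (solve k words)

-- ===== LEMMAS AND PROOFS =====

-- a word starts with the one-char string ⟨c⟩ iff its first char is c
theorem startswith_single (w : String) (c : Char) :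
    PySem.Str.startswith w (String.ofList [c]) = (w.toList.head? == some c) := by
  simp [pysem, PySem.Chars.startswith]
  cases w.toList <;> simp [List.isPrefixOf, eq_comm]

theorem str_get_zero (w : String) : PySem.Str.pyGet? w 0 = w.toList.head? := by
  rw [show PySem.Str.pyGet? w 0 = w.toList[0]? by simp [pysem]]
  exact List.head?_eq_getElem?.symm

theorem str_get_neg_one (w : String) : PySem.Str.pyGet? w (-1) = w.toList.getLast? := by
  simp [pysem]

-- last char of an appended nonempty word
theorem pyGet?_append_neg_one (b w : String) (h : w.toList ≠ []) :
    PySem.Str.pyGet? (b ++ w) (-1) = PySem.Str.pyGet? w (-1) := by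
  rw [str_get_neg_one, str_get_neg_one, String.toList_append]
  exact List.getLast?_append_of_ne_nil _ h

-- characterisation of A's inner scan: success case
theorem solveFind_some (c : Char) : ∀ (ws rest : List String) (w : String),
    solveFind c ws = some (w, rest) →
      PySem.Str.startswith w (String.ofList [c]) = true ∧
      ws.filter (fun x => PySem.Str.startswith x (String.ofList [c])) =
        w :: rest.filter (fun x => PySem.Str.startswith x (String.ofList [c])) ∧
      ∀ g : String → Bool, g w = false → rest.filter g = ws.filter g := by
  intro ws
  induction ws with
  | nil => intro rest w h; simp [solveFind] at h
  | cons x xs ih =>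
    intro rest w h
    simp only [solveFind] at h
    split at h
    · rename_i hx
      cases h
      refine ⟨hx, ?_, ?_⟩
      · simp only [List.filter_cons]; rw [if_pos hx]
      · intro g hg
        simp only [List.filter_cons]; rw [if_neg (by simp [hg])]
    · rename_i hx
      cases hf : solveFind c xs with
      | none => rw [hf] at h; cases h
      | some p =>
        rw [hf] at h
        obtain ⟨w', rest'⟩ := p
        cases h
        obtain ⟨h1, h2, h3⟩ := ih _ _ hf
        refine ⟨h1, ?_, ?_⟩
        · simp only [List.filter_cons]
          rw [if_neg hx, if_neg hx, h2]
        · intro g hg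
          simp only [List.filter_cons]
          rw [h3 g hg]

-- characterisation of A's inner scan: failure case
theorem solveFind_none (c : Char) : ∀ ws : List String,
    solveFind c ws = none → ws.filter (fun x => PySem.Str.startswith x (String.ofList [c])) = [] := by
  intro ws
  induction ws with
  | nil => intro; rfl
  | cons x xs ih =>
    intro h
    simp only [solveFind] at h
    split at h
    · cases h
    · rename_i hx
      cases hf : solveFind c xs with
      | none => simp only [List.filter_cons]; rw [if_neg hx, ih hf]
      | some p => rw [hf] at h; cases h

-- bucket-building invariant
theorem solveBuild_aux (c : Char) : ∀ (ws : List String) (d : PySem.Dict Char (List String)),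
    (ws.foldl (fun d w =>
      match PySem.Str.pyGet? w 0 with
      | none => d
      | some ch => d.insert ch (d.getD ch [] ++ [w])) d).getD c [] =
    d.getD c [] ++ ws.filter (fun x => PySem.Str.startswith x (String.ofList [c])) := by
  intro ws
  induction ws with
  | nil => intro d; simp
  | cons w ws ih =>
    intro d
    rw [List.foldl_cons]
    cases hw : PySem.Str.pyGet? w 0 with
    | none =>
      have hw' := hw; rw [str_get_zero] at hw'
      rw [ih, List.filter_cons, if_neg (by rw [startswith_single, hw']; simp)]
    | some ch =>
      have hw' := hw; rw [str_get_zero] at hw'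
      rw [ih]
      by_cases hc : ch = c
      · subst hc
        rw [PySem.Dict.getD_insert_self, List.filter_cons,
            if_pos (by rw [startswith_single, hw']; simp)]
        simp
      · rw [PySem.Dict.getD_insert_of_ne _ _ _ (Ne.symm hc), List.filter_cons,
            if_neg (by rw [startswith_single, hw']; simp; exact fun h => hc (by cases h; rfl))]

theorem solveBuild_getD (c : Char) (ws : List String) :
    (solveBuild ws).getD c [] = ws.filter (fun x => PySem.Str.startswith x (String.ofList [c])) := by
  rw [solveBuild, solveBuild_aux]
  simp [PySem.Dict.getD, PySem.Dict.get?, PySem.Dict.empty]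

theorem solveRevVals_getD (d : PySem.Dict Char (List String)) (c : Char) :
    (solveRevVals d).getD c [] = (d.getD c []).reverse := by
  obtain ⟨items⟩ := d
  simp only [PySem.Dict.getD, PySem.Dict.get?, solveRevVals]
  induction items with
  | nil => simp
  | cons p rest ih =>
    obtain ⟨k, v⟩ := p
    by_cases hk : (k == c) = true
    · simp [List.find?, hk]
    · simp only [List.map_cons, List.find?]
      simp only [Bool.not_eq_true] at hk
      simp only [hk]
      exact ih

-- the joint loop invariant: the buckets hold, per first char, exactly the remaining
-- matching words in reverse order
theorem loop_eq_chain : ∀ (fuel : Nat) (ws : List String) (d : PySem.Dict Char (List String))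
    (builder : String) (last : Char),
    ws.length ≤ fuel →
    (∀ c, d.getD c [] = (ws.filter (fun x => PySem.Str.startswith x (String.ofList [c]))).reverse) →
    PySem.Str.pyGet? builder (-1) = some last →
    solveLoop ws builder = solveChain fuel d last builder := by
  intro fuel
  induction fuel with
  | zero =>
    intro ws d builder last hlen hinv hlast
    have hws : ws = [] := List.length_eq_zero_iff.mp (Nat.le_zero.mp hlen)
    subst hws
    rw [solveLoop, hlast]
    rfl
  | succ fuel ih =>
    intro ws d builder last hlen hinv hlast
    rw [solveLoop, hlast]
    split
    · rename_i heq; cases heq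
    · rename_i last' heq
      injection heq with heq
      subst heq
      split
      · rename_i hfind
        have hfilt := solveFind_none last ws hfind
        simp only [solveChain, hinv last, hfilt, List.reverse_nil, List.getLast?_nil]
      · rename_i w rest hfind
        obtain ⟨hsw, hfilt, hg⟩ := solveFind_some last ws rest w hfind
        rw [startswith_single] at hsw
        have hhead : w.toList.head? = some last := by simpa using hsw
        have hwne : w.toList ≠ [] := by
          intro hnil; rw [hnil] at hhead; cases hhead
        have hbucket : d.getD last [] =
            (rest.filter (fun x => PySem.Str.startswith x (String.ofList [last]))).reverse ++ [w] := by
          rw [hinv last, hfilt]; simp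
        obtain ⟨c, hc⟩ : ∃ c, PySem.Str.pyGet? w (-1) = some c := by
          rw [str_get_neg_one]
          cases hgl : w.toList.getLast? with
          | none => exact absurd (List.getLast?_eq_none_iff.mp hgl) hwne
          | some c => exact ⟨c, rfl⟩
        have hstep : solveChain (fuel + 1) d last builder =
            solveChain fuel (d.insert last (d.getD last []).dropLast) c (builder ++ w) := by
          simp only [solveChain, hbucket, List.getLast?_concat, hc, List.dropLast_concat]
        rw [hstep]
        have hlen' : rest.length ≤ fuel := by
          have := solveFind_length last ws rest w hfind; omega
        have hinv' : ∀ c', (d.insert last (d.getD last []).dropLast).getD c' [] =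
            (rest.filter (fun x => PySem.Str.startswith x (String.ofList [c']))).reverse := by
          intro c'
          by_cases hcl : c' = last
          · subst hcl
            rw [PySem.Dict.getD_insert_self, hbucket, List.dropLast_concat]
          · rw [PySem.Dict.getD_insert_of_ne _ _ _ hcl, hinv c',
                hg (fun x => PySem.Str.startswith x (String.ofList [c']))
                  (by show PySem.Str.startswith w (String.ofList [c']) = false
                      rw [startswith_single, hhead]
                      simpa using fun h : last = c' => hcl h.symm)]
        exact ih rest _ (builder ++ w) c hlen' hinv'
          (by rw [pyGet?_append_neg_one _ _ hwne]; exact hc)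

-- ===== VERDICT (by name: the statement is the Claim_ definition above) =====
theorem solve_spec : Claim_equal_solve := by
  intro k words _ hpre
  obtain ⟨hpop, hne⟩ := hpre
  unfold Spec_solve
  cases hp : PySem.List.pop? words k with
  | none => rw [hp] at hpop; simp at hpop
  | some p =>
    obtain ⟨builder, rest⟩ := p
    rw [hp] at hne
    have hbne : builder ≠ "" := by simpa using hne
    have hbl : builder.toList ≠ [] := by simpa using hbne
    obtain ⟨last, hlast⟩ : ∃ c, PySem.Str.pyGet? builder (-1) = some c := by
      rw [str_get_neg_one]
      cases hgl : builder.toList.getLast? with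
      | none => exact absurd (List.getLast?_eq_none_iff.mp hgl) hbl
      | some c => exact ⟨c, rfl⟩
    rw [solve, solve_alt]
    simp only [hp, hlast]
    apply loop_eq_chain
    · have := (PySem.List.sorted2_perm rest
        (fun x => -(PySem.Str.len x)) (fun x => x) false).length_eq
      omega
    · intro c
      rw [solveRevVals_getD, solveBuild_getD]
    · exact hlast
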